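-- pv_equiv track=rewrite | github.com/ShuvalovAnthony/ez_python | Matvei/26/21719/21719.py | findMaxSolvedTasks
-- ===== SOURCE A (Python) =====
-- def findMaxSolvedTasks(tasks: set):
--     tasks = sorted(tasks)
--     max_solved_tasks = 0
--     temp_solved_tasks = 1
--
--     for i in range(len(tasks) - 1):
--         if tasks[i] == tasks[i + 1] - 2:
--             temp_solved_tasks += 1
--         else:
--             max_solved_tasks = max(max_solved_tasks, temp_solved_tasks)
--             temp_solved_tasks = 1
--
--     return max(max_solved_tasks, temp_solved_tasks)
-- ===== SOURCE B (Python) =====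
-- def findMaxSolvedTasks(tasks: set):
--     # No sort: walk +2 chains in a hash set.  A run of the sorted list continues
--     # from x exactly when x+2 is present and x+1 is absent, so we count each
--     # maximal such chain starting from its leftmost element.
--     s = set(tasks)
--     best = 1
--     for x in s:
--         if not (x - 2 in s and x - 1 not in s):   # x starts a run
--             length = 1
--             y = x + 2
--             while y in s and y - 1 not in s:
--                 length += 1
--                 y += 2
--             if length > best:
--                 best = length
--     return best
-- ===== Notes on version B (the rewrite author's own statement) =====
-- stated objective: alternative
-- what changed: Replaces sort-then-scan-adjacent-pairs with a hash-set chain walk: from each element that does not extend a run (x-2 absent, or x-1 present) walk x, x+2, ... while the next value is present and no intermediate value (y-1) sits between, taking the max chain length; no sorting at all.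
import Mathlib
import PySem

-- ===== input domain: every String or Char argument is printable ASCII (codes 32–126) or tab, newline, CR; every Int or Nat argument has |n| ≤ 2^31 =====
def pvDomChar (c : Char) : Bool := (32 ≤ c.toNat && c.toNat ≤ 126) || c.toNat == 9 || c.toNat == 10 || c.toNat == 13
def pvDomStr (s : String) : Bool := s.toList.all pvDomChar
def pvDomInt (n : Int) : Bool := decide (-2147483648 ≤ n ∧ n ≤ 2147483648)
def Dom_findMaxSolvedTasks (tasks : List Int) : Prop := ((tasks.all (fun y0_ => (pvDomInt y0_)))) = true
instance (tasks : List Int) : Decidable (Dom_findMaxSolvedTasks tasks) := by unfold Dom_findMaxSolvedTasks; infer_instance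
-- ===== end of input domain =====

-- B replaces A's sort-then-scan-adjacent-pairs with an unsorted hash-set chain walk (alternative algorithm, same result).


-- ===== PORT A =====
def findMaxSolvedTasks (tasks : List Int) : Int :=
  let ts := PySem.List.sorted tasks (fun x => x) false
  let st := (PySem.List.pyRange 0 ((ts.length : Int) - 1) 1).foldl
    (fun (p : Int × Int) i =>
      if PySem.List.pyGetD ts i 0 = PySem.List.pyGetD ts (i + 1) 0 - 2
      then (p.1, p.2 + 1)
      else (max p.1 p.2, 1))
    (0, 1)
  max st.1 st.2

-- ===== PORT B =====
-- the 'while y in s and y - 1 not in s' loop of Source B, totalised with fuel s.length + 1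
-- (each successful test consumes a fresh member of s, so the fuel never runs out)
def pvChainWalk (s : List Int) (y : Int) (len : Int) : Nat → Int
  | 0 => len
  | fuel + 1 =>
    if y ∈ s ∧ (y - 1) ∉ s then pvChainWalk s (y + 2) (len + 1) fuel else len

def findMaxSolvedTasks_alt (tasks : List Int) : Int :=
  let s := PySem.Set.ofList tasks
  s.foldl
    (fun best x =>
      if ¬((x - 2) ∈ s ∧ (x - 1) ∉ s) then
        let len := pvChainWalk s (x + 2) 1 (s.length + 1)
        if len > best then len else best
      else best)
    1

-- ===== PRECONDITION & SPEC =====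
-- The Python parameter is a set: its List Int encoding holds distinct elements, so Pre_ excludes no actual input.
def Pre_findMaxSolvedTasks (tasks : List Int) : Prop := tasks.Nodup
instance (tasks : List Int) : Decidable (Pre_findMaxSolvedTasks tasks) := by unfold Pre_findMaxSolvedTasks; infer_instance
def pvWitness_findMaxSolvedTasks : List Int := [1, 3, 4]

def Spec_findMaxSolvedTasks (tasks : List Int) (out : Int) : Prop := out = findMaxSolvedTasks_alt tasks
instance (tasks : List Int) (out : Int) : Decidable (Spec_findMaxSolvedTasks tasks out) := by unfold Spec_findMaxSolvedTasks; infer_instance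

-- ===== CLAIM (what is proved, stated in full; the proofs are below) =====
def Claim_equal_findMaxSolvedTasks : Prop := ∀ (tasks : List Int), Dom_findMaxSolvedTasks tasks → Pre_findMaxSolvedTasks tasks → Spec_findMaxSolvedTasks tasks (findMaxSolvedTasks tasks)

-- ===== LEMMAS AND PROOFS =====

-- ---- proof-side recursion mirroring A's scan over the sorted list ----
def pvPairScan (l : List Int) (prev : Int) (p : Int × Int) : Int × Int :=
  match l with
  | [] => p
  | y :: r =>
    if prev = y - 2 then pvPairScan r y (p.1, p.2 + 1) else pvPairScan r y (max p.1 p.2, 1)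

def pvAResult (l : List Int) : Int :=
  match l with
  | [] => 1
  | x :: r => let st := pvPairScan r x (0, 1); max st.1 st.2

-- B's fold over an arbitrary set list S with explicit fuel
def pvW (S : List Int) (f : Nat) (x : Int) : Int :=
  if ¬((x - 2) ∈ S ∧ (x - 1) ∉ S) then pvChainWalk S (x + 2) 1 f else 1

def pvBFold (S : List Int) (f : Nat) (l : List Int) (b : Int) : Int :=
  l.foldl
    (fun best x =>
      if ¬((x - 2) ∈ S ∧ (x - 1) ∉ S) then
        let len := pvChainWalk S (x + 2) 1 f
        if len > best then len else best
      else best) b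

def pvBResult (l : List Int) : Int := pvBFold l (l.length + 1) l 1

-- the arithmetic chain x, x+2, ..., x+2(k-1)
def pvChain (x : Int) : Nat → List Int
  | 0 => []
  | k + 1 => x :: pvChain (x + 2) k

-- split off the leading maximal chain
def pvSplitRun (x : Int) : List Int → Nat × List Int
  | [] => (1, [])
  | y :: r =>
    if y = x + 2 then ((pvSplitRun y r).1 + 1, (pvSplitRun y r).2) else (1, y :: r)


theorem pvRangeScan : ∀ (r : List Int) (x : Int) (p : Int × Int),
    (List.range r.length).foldl
      (fun (p : Int × Int) k =>
        if (x :: r).getD k 0 = (x :: r).getD (k + 1) 0 - 2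
        then (p.1, p.2 + 1) else (max p.1 p.2, 1)) p = pvPairScan r x p := by
  intro r
  induction r with
  | nil => intro x p; simp [pvPairScan]
  | cons y r ih =>
    intro x p
    rw [List.length_cons, List.range_succ_eq_map]
    simp only [List.foldl_cons, List.foldl_map, List.getD_cons_zero, List.getD_cons_succ]
    rw [pvPairScan]
    by_cases hx : x = y - 2
    · simp only [hx]; exact ih y _
    · simp only [if_neg hx]; exact ih y _

theorem pvA_bridge (ts : List Int) :
    max ((PySem.List.pyRange 0 ((ts.length : Int) - 1) 1).foldl
      (fun (p : Int × Int) i =>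
        if PySem.List.pyGetD ts i 0 = PySem.List.pyGetD ts (i + 1) 0 - 2
        then (p.1, p.2 + 1)
        else (max p.1 p.2, 1)) (0, 1)).1
      ((PySem.List.pyRange 0 ((ts.length : Int) - 1) 1).foldl
      (fun (p : Int × Int) i =>
        if PySem.List.pyGetD ts i 0 = PySem.List.pyGetD ts (i + 1) 0 - 2
        then (p.1, p.2 + 1)
        else (max p.1 p.2, 1)) (0, 1)).2 = pvAResult ts := by
  cases ts with
  | nil =>
    rw [PySem.List.pyRange_one_eq_nil (by simp)]
    simp [pvAResult]
  | cons x r =>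
    rw [PySem.List.pyRange_one]
    have h1 : ((((x :: r).length : Int) - 1 - 0).toNat) = r.length := by
      simp [List.length_cons]
    rw [h1, List.foldl_map]
    have h2 : ∀ (p : Int × Int) (k : Nat),
        (if PySem.List.pyGetD (x :: r) ((0 : Int) + k) 0 =
            PySem.List.pyGetD (x :: r) ((0 : Int) + k + 1) 0 - 2
         then (p.1, p.2 + 1) else (max p.1 p.2, 1))
        = (if (x :: r).getD k 0 = (x :: r).getD (k + 1) 0 - 2
           then (p.1, p.2 + 1) else (max p.1 p.2, 1)) := by
      intro p k
      have e1 : (0 : Int) + k = ((k : Nat) : Int) := by omega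
      rw [e1]
      have e2 : ((k : Nat) : Int) + 1 = (((k + 1 : Nat)) : Int) := by push_cast; ring
      rw [e2, PySem.List.pyGetD_natCast, PySem.List.pyGetD_natCast]
    simp only [h2]
    rw [pvRangeScan r x (0, 1)]
    rfl

-- ---- chain walk facts ----

theorem pvChainWalk_congr_mem (S S' : List Int) (h : ∀ v : Int, v ∈ S ↔ v ∈ S') :
    ∀ (f : Nat) (y c : Int), pvChainWalk S y c f = pvChainWalk S' y c f := by
  intro f
  induction f with
  | zero => intro y c; rfl
  | succ f ih =>
    intro y c
    rw [pvChainWalk, pvChainWalk]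
    by_cases hc : y ∈ S ∧ (y - 1) ∉ S
    · rw [if_pos hc, if_pos (by rw [← h, ← h]; exact hc), ih]
    · rw [if_neg hc, if_neg (by rw [← h, ← h]; exact hc)]

theorem pvCountLt (S : List Int) (y : Int) (hy : y ∈ S) :
    S.countP (fun v => decide (y + 2 ≤ v)) < S.countP (fun v => decide (y ≤ v)) := by
  induction S with
  | nil => cases hy
  | cons a S ih =>
    rw [List.countP_cons, List.countP_cons]
    by_cases ha : a = y
    · subst ha
      have hmono : S.countP (fun v => decide (a + 2 ≤ v)) ≤ S.countP (fun v => decide (a ≤ v)) := by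
        apply List.countP_mono_left
        intro x _ hx
        simp only [decide_eq_true_eq] at *
        omega
      simp only [decide_eq_true_eq] at *
      have h1 : ¬ (a + 2 ≤ a) := by omega
      have h2 : a ≤ a := le_refl a
      simp [h1]
      omega
    · have hyS : y ∈ S := by
        rcases List.mem_cons.mp hy with h | h
        · exact absurd h.symm ha
        · exact h
      have := ih hyS
      have himp : (if decide (y + 2 ≤ a) = true then 1 else 0) ≤
          (if decide (y ≤ a) = true then 1 else 0) := by
        by_cases h : y + 2 ≤ a
        · have : y ≤ a := by omega
          simp [h, this]
        · simp [h]
      omega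

theorem pvChainWalk_fuel (S : List Int) :
    ∀ (m : Nat) (y c : Int) (f f' : Nat),
      S.countP (fun v => decide (y ≤ v)) ≤ m → m < f → m < f' →
      pvChainWalk S y c f = pvChainWalk S y c f' := by
  intro m
  induction m with
  | zero =>
    intro y c f f' hm hf hf'
    obtain ⟨f, rfl⟩ := Nat.exists_eq_succ_of_ne_zero (by omega : f ≠ 0)
    obtain ⟨f', rfl⟩ := Nat.exists_eq_succ_of_ne_zero (by omega : f' ≠ 0)
    rw [pvChainWalk, pvChainWalk]
    by_cases hc : y ∈ S ∧ (y - 1) ∉ S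
    · exfalso
      have := pvCountLt S y hc.1
      omega
    · rw [if_neg hc, if_neg hc]
  | succ m ih =>
    intro y c f f' hm hf hf'
    obtain ⟨f, rfl⟩ := Nat.exists_eq_succ_of_ne_zero (by omega : f ≠ 0)
    obtain ⟨f', rfl⟩ := Nat.exists_eq_succ_of_ne_zero (by omega : f' ≠ 0)
    rw [pvChainWalk, pvChainWalk]
    by_cases hc : y ∈ S ∧ (y - 1) ∉ S
    · rw [if_pos hc, if_pos hc]
      apply ih
      · have := pvCountLt S y hc.1
        omega
      · omega
      · omega
    · rw [if_neg hc, if_neg hc]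

-- membership of the arithmetic chain
theorem pvMem_chain : ∀ (k : Nat) (x v : Int), v ∈ pvChain x k ↔ ∃ i : Nat, i < k ∧ v = x + 2 * i := by
  intro k
  induction k with
  | zero => intro x v; simp [pvChain]
  | succ k ih =>
    intro x v
    rw [pvChain, List.mem_cons, ih]
    constructor
    · rintro (rfl | ⟨i, hi, rfl⟩)
      · exact ⟨0, by omega, by push_cast; ring⟩
      · exact ⟨i + 1, by omega, by push_cast; ring⟩
    · rintro ⟨i, hi, rfl⟩
      cases i with
      | zero => left; push_cast; ring
      | succ i => right; exact ⟨i, by omega, by push_cast; ring⟩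

theorem pvChain_length (k : Nat) : ∀ x : Int, (pvChain x k).length = k := by
  induction k with
  | zero => intro x; rfl
  | succ k ih => intro x; rw [pvChain, List.length_cons, ih]

theorem pvSplitRun_spec : ∀ (r : List Int) (x : Int),
    x :: r = pvChain x (pvSplitRun x r).1 ++ (pvSplitRun x r).2 ∧
    1 ≤ (pvSplitRun x r).1 ∧
    (∀ h t, (pvSplitRun x r).2 = h :: t → h ≠ x + 2 * ((pvSplitRun x r).1 : Int)) := by
  intro r
  induction r with
  | nil =>
    intro x
    refine ⟨rfl, le_refl 1, ?_⟩
    intro h t ht; cases ht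
  | cons y r ih =>
    intro x
    rw [pvSplitRun]
    by_cases hy : y = x + 2
    · obtain ⟨ihe, ihk, ihb⟩ := ih y
      rw [if_pos hy]
      refine ⟨?_, by omega, ?_⟩
      · rw [pvChain, List.cons_append]
        rw [← hy, ← ihe]
      · intro h t ht
        have := ihb h t ht
        push_cast
        omega
    · rw [if_neg hy]
      refine ⟨rfl, le_refl 1, ?_⟩
      rintro h t ⟨rfl, rfl⟩
      intro hcon
      exact hy (by omega)

-- ---- generic max-fold lemmas ----

theorem pvMaxFoldExtract (g : Int → Int) : ∀ (l : List Int) (a b : Int),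
    l.foldl (fun c x => max c (g x)) (max a b) = max a (l.foldl (fun c x => max c (g x)) b) := by
  intro l
  induction l with
  | nil => intro a b; rfl
  | cons y l ih =>
    intro a b
    simp only [List.foldl_cons]
    rw [max_assoc, ih]

theorem pvMaxFoldConst1 (g : Int → Int) : ∀ (l : List Int) (c : Int),
    (∀ v ∈ l, g v = 1) → 1 ≤ c → l.foldl (fun c x => max c (g x)) c = c := by
  intro l
  induction l with
  | nil => intro c _ _; rfl
  | cons y l ih =>
    intro c hg hc
    simp only [List.foldl_cons]
    have h1 : max c (g y) = c := by rw [hg y (List.mem_cons_self ..)]; omega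
    rw [h1]
    exact ih c (fun v hv => hg v (List.mem_cons_of_mem _ hv)) hc

theorem pvMaxFoldCongr (g g' : Int → Int) : ∀ (l : List Int) (b : Int),
    (∀ v ∈ l, g v = g' v) → l.foldl (fun c x => max c (g x)) b = l.foldl (fun c x => max c (g' x)) b := by
  intro l
  induction l with
  | nil => intro b _; rfl
  | cons y l ih =>
    intro b hg
    simp only [List.foldl_cons]
    rw [hg y (List.mem_cons_self ..)]
    exact ih _ (fun v hv => hg v (List.mem_cons_of_mem _ hv))

theorem pvBFold_eq_maxfold (S : List Int) (f : Nat) : ∀ (l : List Int) (b : Int), 1 ≤ b →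
    pvBFold S f l b = l.foldl (fun c x => max c (pvW S f x)) b := by
  intro l
  induction l with
  | nil => intro b _; rfl
  | cons y l ih =>
    intro b hb
    rw [pvBFold, List.foldl_cons, List.foldl_cons]
    by_cases hc : ¬((y - 2) ∈ S ∧ (y - 1) ∉ S)
    · rw [if_pos hc]
      have hw : pvW S f y = pvChainWalk S (y + 2) 1 f := by rw [pvW, if_pos hc]
      have he : (let len := pvChainWalk S (y + 2) 1 f;
                 if len > b then len else b) = max b (pvW S f y) := by
        rw [hw]
        show (if pvChainWalk S (y + 2) 1 f > b then pvChainWalk S (y + 2) 1 f else b) = _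
        omega
      rw [he]
      exact ih _ (le_trans hb (le_max_left _ _))
    · rw [if_neg hc]
      have hw : max b (pvW S f y) = b := by rw [pvW, if_neg hc]; omega
      rw [hw]
      exact ih b hb

theorem pvChainWalk_congr_ge (S S' : List Int) : ∀ (f : Nat) (y c : Int),
    (∀ v : Int, y - 1 ≤ v → (v ∈ S ↔ v ∈ S')) → pvChainWalk S y c f = pvChainWalk S' y c f := by
  intro f
  induction f with
  | zero => intro y c _; rfl
  | succ f ih =>
    intro y c h
    rw [pvChainWalk, pvChainWalk]
    have h1 : (y ∈ S ∧ (y - 1) ∉ S) ↔ (y ∈ S' ∧ (y - 1) ∉ S') := by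
      rw [h y (by omega), h (y - 1) (by omega)]
    by_cases hc : y ∈ S ∧ (y - 1) ∉ S
    · rw [if_pos hc, if_pos (h1.mp hc)]
      exact ih (y + 2) (c + 1) (fun v hv => h v (by omega))
    · rw [if_neg hc, if_neg (fun hx => hc (h1.mpr hx))]

-- ---- the scan along the leading chain ----

theorem pvPairScan_chain : ∀ (j : Nat) (x : Int) (rest : List Int) (mx tmp : Int),
    pvPairScan (pvChain (x + 2) j ++ rest) x (mx, tmp)
      = pvPairScan rest (x + 2 * (j : Int)) (mx, tmp + (j : Int)) := by
  intro j
  induction j with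
  | zero => intro x rest mx tmp; norm_num [pvChain]
  | succ j ih =>
    intro x rest mx tmp
    rw [pvChain, List.cons_append, pvPairScan, if_pos (by ring)]
    rw [ih (x + 2) rest mx (tmp + 1)]
    have e1 : x + 2 + 2 * (j : Int) = x + 2 * ((j + 1 : Nat) : Int) := by push_cast; ring
    have e2 : tmp + 1 + (j : Int) = tmp + ((j + 1 : Nat) : Int) := by push_cast; ring
    rw [e1, e2]

theorem pvPairScan_acc : ∀ (t : List Int) (h mx tmp : Int), 0 ≤ tmp →
    max (pvPairScan t h (mx, tmp)).1 (pvPairScan t h (mx, tmp)).2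
      = max mx (max (pvPairScan t h (0, tmp)).1 (pvPairScan t h (0, tmp)).2) := by
  intro t
  induction t with
  | nil => intro h mx tmp htmp; simp only [pvPairScan]; omega
  | cons y t ih =>
    intro h mx tmp htmp
    rw [pvPairScan, pvPairScan]
    by_cases hc : h = y - 2
    · rw [if_pos hc, if_pos hc]
      exact ih y mx (tmp + 1) (by omega)
    · rw [if_neg hc, if_neg hc]
      rw [ih y (max mx tmp) 1 (by omega), ih y (max 0 tmp) 1 (by omega)]
      omega

-- ---- the chain walk along the leading chain ----

theorem pvWalkChain (l : List Int) (x : Int) (k' : Nat) (rest : List Int)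
    (hl : ∀ v : Int, v ∈ l ↔ v ∈ pvChain x (k' + 1) ∨ v ∈ rest)
    (hb : ∀ h t, rest = h :: t → h ≠ x + 2 * ((k' + 1 : Nat) : Int))
    (hcross : ∀ a ∈ pvChain x (k' + 1), ∀ b ∈ rest, a < b)
    (hrestpw : rest.Pairwise (· < ·)) :
    ∀ (d j : Nat), j + d = k' + 1 → 1 ≤ j → ∀ (c : Int) (f : Nat), d < f →
      pvChainWalk l (x + 2 * (j : Int)) c f = c + (d : Int) := by
  have hLmem : x + 2 * (k' : Int) ∈ pvChain x (k' + 1) :=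
    (pvMem_chain (k' + 1) x _).mpr ⟨k', by omega, rfl⟩
  intro d
  induction d with
  | zero =>
    intro j hj _ c f hf
    obtain ⟨f, rfl⟩ := Nat.exists_eq_succ_of_ne_zero (by omega : f ≠ 0)
    have hjk : j = k' + 1 := by omega
    subst hjk
    rw [pvChainWalk]
    have hcond : ¬(x + 2 * ((k' + 1 : Nat) : Int) ∈ l ∧ (x + 2 * ((k' + 1 : Nat) : Int) - 1) ∉ l) := by
      rintro ⟨hy, hy1⟩
      have hyc : x + 2 * ((k' + 1 : Nat) : Int) ∉ pvChain x (k' + 1) := by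
        intro hm
        obtain ⟨i, hi, he⟩ := (pvMem_chain (k' + 1) x _).mp hm
        push_cast at he
        omega
      have hyr : x + 2 * ((k' + 1 : Nat) : Int) ∈ rest := by
        rcases (hl _).mp hy with h | h
        · exact absurd h hyc
        · exact h
      obtain ⟨h, t, rfl⟩ : ∃ h t, rest = h :: t := by
        cases rest with
        | nil => cases hyr
        | cons h t => exact ⟨h, t, rfl⟩
      have hhy : h ≤ x + 2 * ((k' + 1 : Nat) : Int) := by
        rcases List.mem_cons.mp hyr with h1 | h1
        · omega
        · have := (List.pairwise_cons.mp hrestpw).1 _ h1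
          omega
      have hLh : x + 2 * (k' : Int) < h := hcross _ hLmem h (List.mem_cons_self ..)
      have hne : h ≠ x + 2 * ((k' + 1 : Nat) : Int) := hb h t rfl
      have hhval : h = x + 2 * ((k' + 1 : Nat) : Int) - 1 := by push_cast at *; omega
      exact hy1 ((hl _).mpr (Or.inr (by rw [← hhval]; exact List.mem_cons_self ..)))
    rw [if_neg hcond]
    omega
  | succ d ih =>
    intro j hj hj1 c f hf
    obtain ⟨f, rfl⟩ := Nat.exists_eq_succ_of_ne_zero (by omega : f ≠ 0)
    rw [pvChainWalk]
    have hmemc : x + 2 * (j : Int) ∈ pvChain x (k' + 1) :=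
      (pvMem_chain (k' + 1) x _).mpr ⟨j, by omega, rfl⟩
    have hcond : x + 2 * (j : Int) ∈ l ∧ (x + 2 * (j : Int) - 1) ∉ l := by
      constructor
      · exact (hl _).mpr (Or.inl hmemc)
      · intro hm
        rcases (hl _).mp hm with h | h
        · obtain ⟨i, hi, he⟩ := (pvMem_chain (k' + 1) x _).mp h
          omega
        · have := hcross _ hLmem _ h
          omega
    rw [if_pos hcond]
    have e1 : x + 2 * (j : Int) + 2 = x + 2 * ((j + 1 : Nat) : Int) := by push_cast; ring
    rw [e1, ih (j + 1) (by omega) (by omega) (c + 1) f (by omega)]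
    push_cast
    ring

-- ---- the main induction: A's scan equals B's walk on a strictly sorted list ----

theorem pvMain : ∀ (n : Nat) (l : List Int), l.length ≤ n → l.Pairwise (· < ·) →
    pvAResult l = pvBResult l := by
  intro n
  induction n with
  | zero =>
    intro l hl _
    cases l with
    | nil => rfl
    | cons x r => simp at hl
  | succ n ih =>
    intro l hlen hp
    cases l with
    | nil => rfl
    | cons x r =>
      obtain ⟨hsplit, hk, hbreak⟩ := pvSplitRun_spec r x
      obtain ⟨k', hk'⟩ : ∃ k', (pvSplitRun x r).1 = k' + 1 :=
        ⟨(pvSplitRun x r).1 - 1, by omega⟩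
      rw [hk'] at hsplit hbreak
      obtain ⟨rest, hrest2⟩ : ∃ rest, (pvSplitRun x r).2 = rest := ⟨_, rfl⟩
      rw [hrest2] at hsplit hbreak
      -- decompose pairwise
      have hp2 : (pvChain x (k' + 1) ++ rest).Pairwise (· < ·) := hsplit ▸ hp
      obtain ⟨hchainpw, hrestpw, hcross⟩ := List.pairwise_append.mp hp2
      have hmem : ∀ v : Int, v ∈ x :: r ↔ v ∈ pvChain x (k' + 1) ∨ v ∈ rest := by
        intro v; rw [hsplit, List.mem_append]
      have hLmem : x + 2 * (k' : Int) ∈ pvChain x (k' + 1) :=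
        (pvMem_chain (k' + 1) x _).mpr ⟨k', by omega, rfl⟩
      have hlen2 : (x :: r).length = (k' + 1) + rest.length := by
        rw [hsplit, List.length_append, pvChain_length]
      -- ===== A side =====
      have hr : r = pvChain (x + 2) k' ++ rest := by
        have h1 := hsplit
        rw [pvChain, List.cons_append] at h1
        exact (List.cons.injEq _ _ _ _ ▸ h1).2
      have hA : pvAResult (x :: r)
          = max (pvPairScan rest (x + 2 * (k' : Int)) (0, 1 + (k' : Int))).1
                (pvPairScan rest (x + 2 * (k' : Int)) (0, 1 + (k' : Int))).2 := by
        show max (pvPairScan r x (0, 1)).1 (pvPairScan r x (0, 1)).2 = _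
        rw [hr, pvPairScan_chain]
      -- ===== B side =====
      have hBstart : ¬((x - 2) ∈ (x :: r) ∧ (x - 1) ∉ (x :: r)) := by
        rintro ⟨hm, _⟩
        rcases (hmem _).mp hm with h | h
        · obtain ⟨i, hi, he⟩ := (pvMem_chain (k' + 1) x _).mp h
          omega
        · have hxmem : x ∈ pvChain x (k' + 1) := (pvMem_chain (k' + 1) x _).mpr ⟨0, by omega, by ring⟩
          have := hcross _ hxmem _ h
          omega
      have hWalkx : pvChainWalk (x :: r) (x + 2) 1 ((x :: r).length + 1) = 1 + (k' : Int) := by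
        have := pvWalkChain (x :: r) x k' rest hmem hbreak hcross hrestpw k' 1 (by omega) (by omega)
          1 ((x :: r).length + 1) (by omega)
        simpa using this
      have hgx : pvW (x :: r) ((x :: r).length + 1) x = 1 + (k' : Int) := by
        rw [pvW, if_pos hBstart]
        exact hWalkx
      have hgchain : ∀ v ∈ pvChain (x + 2) k', pvW (x :: r) ((x :: r).length + 1) v = 1 := by
        intro v hv
        obtain ⟨i, hi, rfl⟩ := (pvMem_chain k' (x + 2) v).mp hv
        rw [pvW, if_neg]
        intro hcon
        apply hcon
        constructor
        · apply (hmem _).mpr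
          exact Or.inl ((pvMem_chain (k' + 1) x _).mpr ⟨i, by omega, by omega⟩)
        · intro hm
          rcases (hmem _).mp hm with h | h
          · obtain ⟨i2, hi2, he2⟩ := (pvMem_chain (k' + 1) x _).mp h
            omega
          · have := hcross _ hLmem _ h
            omega
      have hB : pvBResult (x :: r)
          = rest.foldl (fun c v => max c (pvW (x :: r) ((x :: r).length + 1) v)) (1 + (k' : Int)) := by
        show pvBFold (x :: r) ((x :: r).length + 1) (x :: r) 1 = _
        rw [pvBFold_eq_maxfold _ _ _ _ (by omega)]
        set gg := pvW (x :: r) ((x :: r).length + 1) with hgg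
        rw [hsplit, pvChain, List.cons_append, List.foldl_cons, List.foldl_append]
        rw [show max 1 (gg x) = 1 + (k' : Int) by rw [hgx]; omega]
        rw [pvMaxFoldConst1 gg (pvChain (x + 2) k') (1 + (k' : Int)) (fun v hv => hgchain v hv) (by omega)]
      -- case split on rest
      rcases rest with _ | ⟨hd, t⟩
      · rw [hA, hB]
        simp only [pvPairScan, List.foldl_nil]
        omega
      ·
        -- facts about h and the elements of rest
        have hLh : x + 2 * (k' : Int) < hd := hcross _ hLmem hd (List.mem_cons_self ..)
        have hne : hd ≠ x + 2 * ((k' + 1 : Nat) : Int) := hbreak hd t rfl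
        have hht : ∀ b ∈ t, hd < b := (List.pairwise_cons.mp hrestpw).1
        have hchain_lt : ∀ v ∈ pvChain x (k' + 1), v ≤ x + 2 * (k' : Int) := by
          intro v hv
          obtain ⟨i, hi, rfl⟩ := (pvMem_chain (k' + 1) x _).mp hv
          omega
        -- membership above the chain reduces to rest
        have hmem_hi : ∀ v : Int, x + 2 * (k' : Int) < v → (v ∈ x :: r ↔ v ∈ hd :: t) := by
          intro v hv
          rw [hmem]
          constructor
          · rintro (h1 | h1)
            · have := hchain_lt _ h1; omega
            · exact h1
          · exact Or.inr
        -- the fold function agrees with the one for rest alone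
        have hWcongr : ∀ y ∈ hd :: t,
            pvW (x :: r) ((x :: r).length + 1) y = pvW (hd :: t) ((hd :: t).length + 1) y := by
          intro y hy
          have hhy : hd ≤ y := by
            rcases List.mem_cons.mp hy with h1 | h1
            · omega
            · have := hht _ h1; omega
          have hcond : ((y - 2) ∈ (x :: r) ∧ (y - 1) ∉ (x :: r))
              ↔ ((y - 2) ∈ (hd :: t) ∧ (y - 1) ∉ (hd :: t)) := by
            by_cases hy1 : y = hd
            · have h2 : (y - 2) ∉ (hd :: t) := by
                intro hm
                rcases List.mem_cons.mp hm with h1 | h1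
                · omega
                · have := hht _ h1; omega
              by_cases hcase : x + 2 * (k' : Int) + 3 ≤ y
              · rw [hmem_hi (y - 2) (by omega), hmem_hi (y - 1) (by omega)]
              · -- y = L + 1
                have hyL : y = x + 2 * (k' : Int) + 1 := by push_cast at hne; omega
                have h1 : (y - 2) ∉ (x :: r) := by
                  intro hm
                  rcases (hmem _).mp hm with h3 | h3
                  · obtain ⟨i, hi, he⟩ := (pvMem_chain (k' + 1) x _).mp h3
                    omega
                  · rcases List.mem_cons.mp h3 with h4 | h4
                    · omega
                    · have := hht _ h4; omega
                simp [h1, h2]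
            · have hy2 : y ∈ t := by
                rcases List.mem_cons.mp hy with h1 | h1
                · exact absurd h1 hy1
                · exact h1
              have hhy' : hd < y := hht _ hy2
              by_cases hy3 : y = hd + 1
              · have hm1 : (y - 1) ∈ (hd :: t) := by rw [hy3]; simp
                have hm2 : (y - 1) ∈ (x :: r) := (hmem_hi _ (by omega)).mpr hm1
                simp [hm1, hm2]
              · have e1 := hmem_hi (y - 2) (by omega)
                have e2 := hmem_hi (y - 1) (by omega)
                rw [e1, e2]
          rw [pvW, pvW]
          by_cases hc : ((y - 2) ∈ (x :: r) ∧ (y - 1) ∉ (x :: r))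
          · rw [if_neg (by simpa using hc), if_neg (by simpa using hcond.mp hc)]
          · rw [if_pos hc, if_pos (fun hx2 => hc (hcond.mpr hx2))]
            rw [pvChainWalk_congr_ge (x :: r) (hd :: t) _ (y + 2) 1
              (fun v hv => hmem_hi v (by omega))]
            apply pvChainWalk_fuel (hd :: t) ((hd :: t).length) (y + 2) 1
            · exact List.countP_le_length
            · omega
            · omega
        -- finish
        rw [hA, hB]
        rw [pvPairScan, if_neg (by push_cast at hne; omega)]
        rw [pvPairScan_acc t hd (max 0 (1 + (k' : Int))) 1 (by omega)]
        rw [show (1 + (k' : Int)) = max (1 + (k' : Int)) 1 by omega]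
        rw [pvMaxFoldExtract]
        rw [pvMaxFoldCongr _ _ _ _ hWcongr]
        rw [← pvBFold_eq_maxfold _ _ _ _ (by omega)]
        have hrec : pvAResult (hd :: t) = pvBResult (hd :: t) := by
          apply ih (hd :: t) (by omega) hrestpw
        have hAr : pvAResult (hd :: t) = max (pvPairScan t hd (0, 1)).1 (pvPairScan t hd (0, 1)).2 := rfl
        rw [show pvBFold (hd :: t) ((hd :: t).length + 1) (hd :: t) 1 = pvBResult (hd :: t) from rfl]
        rw [← hrec, hAr]
        omega

-- ===== VERDICT (by name: the statement is the Claim_ definition above) =====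
theorem findMaxSolvedTasks_spec : Claim_equal_findMaxSolvedTasks := by
  intro tasks _ hnd
  unfold Spec_findMaxSolvedTasks
  have hperm : (PySem.List.sorted tasks (fun x => x) false).Perm tasks :=
    PySem.List.sorted_perm tasks (fun x => x) false
  have hmem : ∀ v : Int, v ∈ tasks ↔ v ∈ PySem.List.sorted tasks (fun x => x) false :=
    fun v => (hperm.mem_iff).symm
  have hlen : (PySem.List.sorted tasks (fun x => x) false).length = tasks.length := hperm.length_eq
  have hnd_l : (PySem.List.sorted tasks (fun x => x) false).Nodup := (hperm.nodup_iff).mpr hnd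
  have hle : (PySem.List.sorted tasks (fun x => x) false).Pairwise (fun a b => a ≤ b) := by
    have := PySem.List.sorted_pairwise tasks (fun x => x)
    simpa using this
  have hlt : (PySem.List.sorted tasks (fun x => x) false).Pairwise (· < ·) := by
    have hand := hle.and hnd_l
    exact hand.imp (fun hab => lt_of_le_of_ne hab.1 hab.2)
  -- A side
  have hA : findMaxSolvedTasks tasks = pvAResult (PySem.List.sorted tasks (fun x => x) false) := by
    have h0 : findMaxSolvedTasks tasks
        = max ((PySem.List.pyRange 0 (((PySem.List.sorted tasks (fun x => x) false).length : Int) - 1) 1).foldl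
            (fun (p : Int × Int) i =>
              if PySem.List.pyGetD (PySem.List.sorted tasks (fun x => x) false) i 0 =
                  PySem.List.pyGetD (PySem.List.sorted tasks (fun x => x) false) (i + 1) 0 - 2
              then (p.1, p.2 + 1)
              else (max p.1 p.2, 1)) (0, 1)).1
          ((PySem.List.pyRange 0 (((PySem.List.sorted tasks (fun x => x) false).length : Int) - 1) 1).foldl
            (fun (p : Int × Int) i =>
              if PySem.List.pyGetD (PySem.List.sorted tasks (fun x => x) false) i 0 =
                  PySem.List.pyGetD (PySem.List.sorted tasks (fun x => x) false) (i + 1) 0 - 2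
              then (p.1, p.2 + 1)
              else (max p.1 p.2, 1)) (0, 1)).2 := rfl
    rw [h0, pvA_bridge]
  -- B side
  have hofl : PySem.Set.ofList tasks = tasks := PySem.Set.ofList_eq_self_of_nodup tasks hnd
  have hB : findMaxSolvedTasks_alt tasks = pvBResult (PySem.List.sorted tasks (fun x => x) false) := by
    have h0 : findMaxSolvedTasks_alt tasks
        = pvBFold (PySem.Set.ofList tasks) ((PySem.Set.ofList tasks).length + 1)
            (PySem.Set.ofList tasks) 1 := rfl
    rw [h0, hofl]
    rw [pvBFold_eq_maxfold _ _ _ _ (by omega)]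
    have hWeq : ∀ y ∈ tasks, pvW tasks (tasks.length + 1) y
        = pvW (PySem.List.sorted tasks (fun x => x) false)
            ((PySem.List.sorted tasks (fun x => x) false).length + 1) y := by
      intro y _
      rw [pvW, pvW]
      have hcond : ((y - 2) ∈ tasks ∧ (y - 1) ∉ tasks)
          ↔ ((y - 2) ∈ PySem.List.sorted tasks (fun x => x) false ∧
             (y - 1) ∉ PySem.List.sorted tasks (fun x => x) false) := by
        rw [hmem (y - 2), hmem (y - 1)]
      by_cases hc : ((y - 2) ∈ tasks ∧ (y - 1) ∉ tasks)
      · rw [if_neg (by simpa using hc), if_neg (by simpa using hcond.mp hc)]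
      · rw [if_pos hc, if_pos (fun hx2 => hc (hcond.mpr hx2))]
        rw [hlen]
        exact pvChainWalk_congr_mem tasks _ hmem _ _ _
    rw [pvMaxFoldCongr _ _ _ _ hWeq]
    rw [List.Perm.foldl_eq'
      (f := fun (c x : Int) => max c (pvW (PySem.List.sorted tasks (fun x => x) false)
        ((PySem.List.sorted tasks (fun x => x) false).length + 1) x))
      hperm.symm (fun a _ b _ z => max_right_comm z _ _) 1]
    rw [← pvBFold_eq_maxfold _ _ _ _ (by omega)]
    rfl
  rw [hA, hB]
  exact pvMain (PySem.List.sorted tasks (fun x => x) false).length _ le_rfl hlt
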